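-- pv_equiv track=rewrite | github.com/Kennedh/CodeWars | Seven ate nine!.py | hungry_seven
-- ===== SOURCE A (Python) =====
-- def hungry_seven(arr):
--     res = arr[:]
--     i = 0
--     while i < len(res) - 2:
--         if res[i] == 7 and res[i + 1] == 8 and res[i + 2] == 9:
--             res[i + 1], res[i + 2] = res[i + 2], res[i + 1]
--             i += 3
--         else:
--             i += 1
--     return res
-- ===== SOURCE B (Python) =====
-- def hungry_seven(arr):
--     # Right-to-left single pass: build the result back-to-front; a 7 meeting a
--     # pending "8,9" head swaps them.  (out holds the processed suffix reversed.)
--     out = []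
--     for x in reversed(arr):
--         if x == 7 and len(out) >= 2 and out[-1] == 8 and out[-2] == 9:
--             out[-1], out[-2] = out[-2], out[-1]
--             out.append(7)
--         else:
--             out.append(x)
--     return out[::-1]
-- ===== Notes on version B (the rewrite author's own statement) =====
-- stated objective: alternative
-- what changed: Replaces A's in-place left-to-right scan with a stride-3 skip by a single right-to-left pass that builds the result back-to-front, swapping a pending 8,9 head when a 7 arrives.
import Mathlib
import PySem

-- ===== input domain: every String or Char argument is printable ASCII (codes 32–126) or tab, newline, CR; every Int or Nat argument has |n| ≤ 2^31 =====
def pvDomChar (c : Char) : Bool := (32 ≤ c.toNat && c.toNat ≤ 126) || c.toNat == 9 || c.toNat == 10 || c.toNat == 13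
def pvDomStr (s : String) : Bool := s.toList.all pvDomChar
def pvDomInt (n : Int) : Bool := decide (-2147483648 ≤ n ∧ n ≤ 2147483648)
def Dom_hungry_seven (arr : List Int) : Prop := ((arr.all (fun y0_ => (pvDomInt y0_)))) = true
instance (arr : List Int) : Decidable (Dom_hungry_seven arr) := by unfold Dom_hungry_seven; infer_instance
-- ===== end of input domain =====

-- B changes the traversal: one right-to-left pass building the result back-to-front,
-- instead of A's in-place left-to-right scan-and-swap with a stride-3 skip (objective: alternative).

-- ===== PORT A =====
-- the while loop of A; indices are always in range when read (i+2 < res.length), so getD is exact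
def hungrySevenLoopA (res : List Int) (i : Nat) : List Int :=
  if i < res.length - 2 then
    if res.getD i 0 = 7 ∧ res.getD (i+1) 0 = 8 ∧ res.getD (i+2) 0 = 9 then
      hungrySevenLoopA ((res.set (i+1) (res.getD (i+2) 0)).set (i+2) (res.getD (i+1) 0)) (i+3)
    else
      hungrySevenLoopA res (i+1)
  else res
termination_by res.length - i
decreasing_by
  · simp only [List.length_set]; omega
  · omega

def hungry_seven (arr : List Int) : List Int :=
  hungrySevenLoopA arr 0      -- res = arr[:]; i = 0

-- ===== PORT B =====
-- Python's `out` is built by appending at the end and finally reversed; the port keeps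
-- `out` head-first (cons = append, head = out[-1]), so the final out[::-1] is `out` itself.
def hungrySevenStepB (out : List Int) (x : Int) : List Int :=
  match out with
  | a :: b :: rest => if x = 7 ∧ a = 8 ∧ b = 9 then 7 :: 9 :: 8 :: rest else x :: out
  | _ => x :: out

def hungry_seven_alt (arr : List Int) : List Int :=
  arr.reverse.foldl hungrySevenStepB []

-- ===== PRECONDITION & SPEC =====
def Spec_hungry_seven (arr : List Int) (out : List Int) : Prop := out = hungry_seven_alt arr
instance (arr : List Int) (out : List Int) : Decidable (Spec_hungry_seven arr out) := by unfold Spec_hungry_seven; infer_instance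

-- ===== CLAIM (what is proved, stated in full; the proofs are below) =====
def Claim_equal_hungry_seven : Prop := ∀ (arr : List Int), Dom_hungry_seven arr → Spec_hungry_seven arr (hungry_seven arr)

-- ===== LEMMAS AND PROOFS =====

-- reference recursion: left-to-right structural version of the transformation
def hsGo : List Int → List Int
  | a :: b :: c :: rest =>
      if a = 7 ∧ b = 8 ∧ c = 9 then 7 :: 9 :: 8 :: hsGo rest else a :: hsGo (b :: c :: rest)
  | l => l

-- unfolding lemmas for hsGo ---------------------------------------------

lemma hsGo_cons_ne7 (x : Int) (t : List Int) (hx : x ≠ 7) : hsGo (x :: t) = x :: hsGo t := by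
  match t with
  | [] => rfl
  | [c] => rfl
  | c :: d :: u => rw [hsGo, if_neg (by intro h; exact hx h.1)]

lemma hsGo_89 (u : List Int) : hsGo (8 :: 9 :: u) = 8 :: 9 :: hsGo u := by
  rw [hsGo_cons_ne7 8 _ (by norm_num), hsGo_cons_ne7 9 _ (by norm_num)]

lemma hsGo_789 (u : List Int) : hsGo (7 :: 8 :: 9 :: u) = 7 :: 9 :: 8 :: hsGo u := by
  rw [hsGo, if_pos ⟨rfl, rfl, rfl⟩]

lemma hsGo_7_no89 (t : List Int) (h : t.take 2 ≠ [8, 9]) : hsGo (7 :: t) = 7 :: hsGo t := by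
  match t with
  | [] => rfl
  | [c] => rfl
  | c :: d :: u =>
    rw [hsGo, if_neg (by intro ⟨_, h1, h2⟩; exact h (by rw [h1, h2]; rfl))]

-- if the output starts with 8 :: 9, so did the input, and the tails correspond
lemma hsGo_head89 (t r : List Int) (h : hsGo t = 8 :: 9 :: r) :
    t.take 2 = [8, 9] ∧ r = hsGo (t.drop 2) := by
  match t with
  | [] => simp [hsGo] at h
  | [a] => simp [hsGo] at h
  | [a, b] =>
    simp only [hsGo] at h
    simp only [List.cons.injEq] at h
    refine ⟨by rw [h.1, h.2.1]; rfl, by rw [← h.2.2]; rfl⟩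
  | a :: b :: c :: u =>
    rw [hsGo] at h
    split at h
    · simp at h
    · simp only [List.cons.injEq] at h
      obtain ⟨ha, h2⟩ := h
      match u with
      | [] =>
        simp only [hsGo] at h2
        simp only [List.cons.injEq] at h2
        exact ⟨by rw [ha, h2.1]; rfl, by rw [← h2.2]; rfl⟩
      | e :: u' =>
        rw [hsGo] at h2
        split at h2
        · simp at h2
        · simp only [List.cons.injEq] at h2
          exact ⟨by rw [ha, h2.1]; rfl, by rw [← h2.2]; rfl⟩

-- B = hsGo --------------------------------------------------------------

lemma step_go (x : Int) (t : List Int) :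
    hungrySevenStepB (hsGo t) x = hsGo (x :: t) := by
  by_cases hx : x = 7
  · subst hx
    by_cases h89 : t.take 2 = [8, 9]
    · obtain ⟨u, hu⟩ : ∃ u, t = 8 :: 9 :: u := by
        match t with
        | [] => simp at h89
        | [a] => simp at h89
        | a :: b :: u =>
          simp only [List.take, List.cons.injEq] at h89
          exact ⟨u, by rw [h89.1, h89.2.1]⟩
      subst hu
      rw [hsGo_89, hsGo_789, hungrySevenStepB, if_pos ⟨rfl, rfl, rfl⟩]
    · rw [hsGo_7_no89 t h89]
      match hG : hsGo t with
      | [] => rfl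
      | [a] => rfl
      | a :: b :: r =>
        rw [hungrySevenStepB,
          if_neg (by
            intro ⟨_, h1, h2⟩
            subst h1; subst h2
            exact h89 (hsGo_head89 t r hG).1)]
  · have hR := hsGo_cons_ne7 x t hx
    rw [hR]
    match hsGo t with
    | [] => rfl
    | [a] => rfl
    | a :: b :: r => rw [hungrySevenStepB, if_neg (by intro h; exact hx h.1)]

lemma alt_eq_go (arr : List Int) : hungry_seven_alt arr = hsGo arr := by
  unfold hungry_seven_alt
  rw [List.foldl_reverse]
  induction arr with
  | nil => rfl
  | cons x t ih => rw [List.foldr_cons, ih, step_go]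

-- A = hsGo --------------------------------------------------------------

lemma loopA_eq_go : ∀ n (res pre : List Int), res.length = n →
    hungrySevenLoopA (pre ++ res) pre.length = pre ++ hsGo res := by
  intro n
  induction n using Nat.strong_induction_on with
  | _ n ih =>
    intro res pre hn
    match res with
    | [] => rw [hungrySevenLoopA]; simp [hsGo]
    | [a] =>
      rw [hungrySevenLoopA]
      rw [if_neg (by simp)]
      rfl
    | [a, b] =>
      rw [hungrySevenLoopA]
      rw [if_neg (by simp)]
      rfl
    | a :: b :: c :: rest =>
      rw [hungrySevenLoopA]
      rw [if_pos (by simp; omega)]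
      have hga : (pre ++ a :: b :: c :: rest).getD pre.length 0 = a := by
        rw [List.getD_append_right _ _ _ _ (Nat.le_refl _)]; simp
      have hgb : (pre ++ a :: b :: c :: rest).getD (pre.length + 1) 0 = b := by
        rw [List.getD_append_right _ _ _ _ (by omega)]
        have : pre.length + 1 - pre.length = 1 := by omega
        rw [this]; rfl
      have hgc : (pre ++ a :: b :: c :: rest).getD (pre.length + 2) 0 = c := by
        rw [List.getD_append_right _ _ _ _ (by omega)]
        have : pre.length + 2 - pre.length = 2 := by omega
        rw [this]; rfl
      rw [hga, hgb, hgc]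
      by_cases hcond : a = 7 ∧ b = 8 ∧ c = 9
      · rw [if_pos hcond]
        obtain ⟨ha, hb, hc⟩ := hcond
        subst ha; subst hb; subst hc
        have hset : ((pre ++ 7 :: 8 :: 9 :: rest).set (pre.length + 1) 9).set (pre.length + 2) 8
            = (pre ++ [7, 9, 8]) ++ rest := by
          rw [List.set_append_right _ _ (by omega), List.set_append_right _ _ (by omega)]
          have h1 : pre.length + 1 - pre.length = 1 := by omega
          have h2 : pre.length + 2 - pre.length = 2 := by omega
          rw [h1, h2]; simp
        rw [hset]
        have h3 : pre.length + 3 = (pre ++ [7, 9, 8]).length := by simp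
        rw [h3, ih rest.length (by simp at hn; omega) rest (pre ++ [7, 9, 8]) rfl]
        rw [hsGo_789]
        simp
      · rw [if_neg hcond]
        have h1 : pre.length + 1 = (pre ++ [a]).length := by simp
        have heq : pre ++ a :: b :: c :: rest = (pre ++ [a]) ++ b :: c :: rest := by simp
        rw [heq, h1, ih (b :: c :: rest).length (by simp at hn ⊢; omega) (b :: c :: rest) (pre ++ [a]) rfl]
        rw [hsGo, if_neg hcond]
        simp

-- ===== VERDICT (by name: the statement is the Claim_ definition above) =====
theorem hungry_seven_spec : Claim_equal_hungry_seven := by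
  intro arr _
  unfold Spec_hungry_seven hungry_seven
  rw [alt_eq_go]
  have := loopA_eq_go arr.length arr [] rfl
  simpa using this
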